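-- pv_equiv track=rewrite | github.com/Theomat/ProgSynth | examples/pbe/transduction/knowledge_graph/kg_path_finder.py | build_search_path_query
-- ===== SOURCE A (Python) =====
-- from typing import List, Tuple
--
-- def __make_query_path__(distance: int, id: int, tabs: int = 1) -> str:
--     if distance == 0:
--         return ("\t" * tabs) + f"w:{{}} ?p{distance} ?o_{id}_{distance} ."
--     else:
--         path = __make_query_path__(distance - 1, id, tabs) + "\n"
--         path += (
--             "\t" * tabs
--         ) + f"?o_{id}_{distance-1} ?p{distance} ?o_{id}_{distance} ."
--         return path
--
-- def __format__(el: str) -> str: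
--     return el.replace(" ", "_").replace("'", "_")
--
-- def build_search_path_query(entities: List[Tuple[str, str]], distance: int = 1) -> str:
--     entities = [(__format__(a), __format__(b)) for a, b in entities]
--     first = entities.pop()
--     subquery = ""
--     for i, item in enumerate(entities):
--         subquery += "\tFILTER EXISTS {\n"
--         subquery += (
--             __make_query_path__(distance, i + 1, 2)
--             .format(item[0])
--             .replace(f"?o_{i + 1}_{distance}", "w:" + item[1])
--         )
--         subquery += "\n\t} .\n"
--     sparql_request = "PREFIX w: <https://en.wikipedia.org/wiki/>\n"
--     sparql_request += "SELECT "
--     sparql_request += " ".join(f"?p{d}" for d in range(distance + 1))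
--     sparql_request += " WHERE {\n"
--     sparql_request += (
--         __make_query_path__(distance, 0)
--         .format(first[0])
--         .replace(f"?o_{0}_{distance}", "w:" + first[1])
--     )
--     sparql_request += "\n"
--     sparql_request += subquery
--     sparql_request += "\n}"
--     return sparql_request
-- ===== SOURCE B (Python) =====
-- from typing import List, Tuple
--
--
-- def build_search_path_query(entities: List[Tuple[str, str]], distance: int = 1) -> str:
--     def fmt(el: str) -> str:
--         return el.replace(" ", "_").replace("'", "_")
--
--     def path_block(a: str, b: str, id: int, tabs: int) -> str:
--         t = "\t" * tabs
--         lines = [t + f"w:{a} ?p0 ?o_{id}_0 ."]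
--         for d in range(1, distance + 1):
--             lines.append(t + f"?o_{id}_{d-1} ?p{d} ?o_{id}_{d} .")
--         return "\n".join(lines).replace(f"?o_{id}_{distance}", "w:" + b)
--
--     pairs = [(fmt(a), fmt(b)) for a, b in entities]
--     first = pairs[-1]
--     blocks = [
--         "\tFILTER EXISTS {\n" + path_block(a, b, i + 1, 2) + "\n\t} .\n"
--         for i, (a, b) in enumerate(pairs[:-1])
--     ]
--     return (
--         "PREFIX w: <https://en.wikipedia.org/wiki/>\n"
--         + "SELECT "
--         + " ".join(f"?p{d}" for d in range(distance + 1))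
--         + " WHERE {\n"
--         + path_block(first[0], first[1], 0, 1)
--         + "\n"
--         + "".join(blocks)
--         + "\n}"
--     )
-- ===== Notes on version B (the rewrite author's own statement) =====
-- stated objective: faster
-- what changed: Replaces the linear recursion __make_query_path__ plus '{}'-placeholder .format with a flat loop that builds the path lines directly (entity inlined by f-string) and joins them, and replaces the string-+= accumulation of the FILTER subqueries with a list comprehension joined at the end.
import Mathlib
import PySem

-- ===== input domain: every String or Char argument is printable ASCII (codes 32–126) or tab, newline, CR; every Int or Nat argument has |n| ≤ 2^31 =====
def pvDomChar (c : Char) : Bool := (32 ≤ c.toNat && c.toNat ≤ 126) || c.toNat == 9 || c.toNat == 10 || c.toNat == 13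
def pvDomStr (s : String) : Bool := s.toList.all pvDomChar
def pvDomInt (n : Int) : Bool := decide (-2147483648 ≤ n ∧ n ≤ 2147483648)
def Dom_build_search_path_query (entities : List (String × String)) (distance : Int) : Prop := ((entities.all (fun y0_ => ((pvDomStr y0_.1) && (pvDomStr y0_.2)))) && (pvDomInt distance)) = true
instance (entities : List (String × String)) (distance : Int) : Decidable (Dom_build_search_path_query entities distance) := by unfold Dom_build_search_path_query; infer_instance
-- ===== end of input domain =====

-- B replaces A's linear recursion + '{}'-placeholder .format by a flat loop that builds the
-- path lines directly and joins them once (measured faster: A re-concatenates the growing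
-- path each level; return value only, neither version mutates its argument).

-- ===== PORT A =====

-- "\t" * tabs
def pvTabs (n : Nat) : List Char := List.replicate n '\t'

-- __format__(el) = el.replace(" ", "_").replace("'", "_")   (shared by both Pythons)
def pvFmtEl (s : List Char) : List Char :=
  PySem.Chars.replace (PySem.Chars.replace s [' '] ['_']) ['\''] ['_']

-- hand port of template.format(arg): replace the FIRST "{}" by arg.  Exact here because the
-- only template ever formatted is __make_query_path__'s output, whose only braces are the
-- single literal "{}" coming from f"w:{{}} …" (ids and distances print as digits/'-').
def pvFormat (s a : List Char) : List Char :=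
  match s with
  | [] => []
  | c :: rest =>
      if c = '{' ∧ rest.head? = some '}' then a ++ rest.tail else c :: pvFormat rest a

-- __make_query_path__(distance, id, tabs); Python recurses on distance down to 0
-- (Pre_ gives 0 ≤ distance, so recursion on the Nat distance.toNat is the same recursion)
def pvMkPath (d : Nat) (id : Int) (tabs : Nat) : List Char :=
  match d with
  | 0 => pvTabs tabs ++ "w:{} ?p0 ?o_".toList ++ PySem.Int.toChars id ++ "_0 .".toList
  | Nat.succ k =>
      pvMkPath k id tabs ++ '\n' ::
        (pvTabs tabs ++ "?o_".toList ++ PySem.Int.toChars id ++ "_".toList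
          ++ PySem.Int.toChars (k : Int) ++ " ?p".toList ++ PySem.Int.toChars ((k : Int) + 1)
          ++ " ?o_".toList ++ PySem.Int.toChars id ++ "_".toList
          ++ PySem.Int.toChars ((k : Int) + 1) ++ " .".toList)

def build_search_path_query (entities : List (String × String)) (distance : Int) : String :=
  let e2 := entities.map (fun p => (pvFmtEl p.1.toList, pvFmtEl p.2.toList))
  match PySem.List.pop? e2 with      -- first = entities.pop()
  | none => ""                        -- Python raises IndexError here (excluded by Pre_)
  | some (first, rest) =>
      let subquery := (PySem.List.enumerate rest).foldl (fun acc p =>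
        acc ++ "\tFILTER EXISTS {\n".toList
            ++ PySem.Chars.replace (pvFormat (pvMkPath distance.toNat (p.1 + 1) 2) p.2.1)
                 ("?o_".toList ++ PySem.Int.toChars (p.1 + 1) ++ "_".toList
                   ++ PySem.Int.toChars distance)
                 ("w:".toList ++ p.2.2)
            ++ "\n\t} .\n".toList) []
      String.ofList ("PREFIX w: <https://en.wikipedia.org/wiki/>\n".toList
        ++ "SELECT ".toList
        ++ PySem.Chars.join " ".toList
             ((PySem.List.pyRange 0 (distance + 1) 1).map
               (fun d => "?p".toList ++ PySem.Int.toChars d))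
        ++ " WHERE {\n".toList
        ++ PySem.Chars.replace (pvFormat (pvMkPath distance.toNat 0 1) first.1)
             ("?o_0_".toList ++ PySem.Int.toChars distance) ("w:".toList ++ first.2)
        ++ ['\n'] ++ subquery ++ "\n}".toList)

-- ===== PORT B =====

-- the distance-0 line with the subject entity inlined
def pvLine0 (a : List Char) (id : Int) (tabs : Nat) : List Char :=
  pvTabs tabs ++ "w:".toList ++ a ++ " ?p0 ?o_".toList ++ PySem.Int.toChars id ++ "_0 .".toList

-- the line appended for d in range(1, distance+1)
def pvLineD (id : Int) (tabs : Nat) (d : Int) : List Char :=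
  pvTabs tabs ++ "?o_".toList ++ PySem.Int.toChars id ++ "_".toList
    ++ PySem.Int.toChars (d - 1) ++ " ?p".toList ++ PySem.Int.toChars d
    ++ " ?o_".toList ++ PySem.Int.toChars id ++ "_".toList ++ PySem.Int.toChars d ++ " .".toList

-- path_block(a, b, id, tabs)
def pvBlock (a b : List Char) (id : Int) (tabs : Nat) (distance : Int) : List Char :=
  PySem.Chars.replace
    (PySem.Chars.join ['\n']
      (pvLine0 a id tabs :: (PySem.List.pyRange 1 (distance + 1) 1).map (pvLineD id tabs)))
    ("?o_".toList ++ PySem.Int.toChars id ++ "_".toList ++ PySem.Int.toChars distance)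
    ("w:".toList ++ b)

def build_search_path_query_alt (entities : List (String × String)) (distance : Int) : String :=
  let pairs := entities.map (fun p => (pvFmtEl p.1.toList, pvFmtEl p.2.toList))
  match PySem.List.pyGet? pairs (-1) with  -- first = pairs[-1]
  | none => ""                              -- Python raises IndexError here (excluded by Pre_)
  | some first =>
      let blocks := (PySem.List.enumerate (PySem.List.slice pairs none (some (-1)))).map
        (fun p => "\tFILTER EXISTS {\n".toList ++ pvBlock p.2.1 p.2.2 (p.1 + 1) 2 distance
                    ++ "\n\t} .\n".toList)
      String.ofList ("PREFIX w: <https://en.wikipedia.org/wiki/>\n".toList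
        ++ "SELECT ".toList
        ++ PySem.Chars.join " ".toList
             ((PySem.List.pyRange 0 (distance + 1) 1).map
               (fun d => "?p".toList ++ PySem.Int.toChars d))
        ++ " WHERE {\n".toList
        ++ pvBlock first.1 first.2 0 1 distance
        ++ ['\n'] ++ PySem.Chars.join [] blocks ++ "\n}".toList)

-- ===== PRECONDITION & SPEC =====
-- Pre_: entities.pop() raises IndexError on an empty list, and __make_query_path__ recurses
-- forever (RecursionError) for distance < 0; exactly those inputs are excluded.
def Pre_build_search_path_query (entities : List (String × String)) (distance : Int) : Prop :=
  entities ≠ [] ∧ 0 ≤ distance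
instance (entities : List (String × String)) (distance : Int) : Decidable (Pre_build_search_path_query entities distance) := by unfold Pre_build_search_path_query; infer_instance

def pvWitness_build_search_path_query : (List (String × String)) × Int := ([("a b", "c'd"), ("e", "f")], 1)

def Spec_build_search_path_query (entities : List (String × String)) (distance : Int) (out : String) : Prop := out = build_search_path_query_alt entities distance
instance (entities : List (String × String)) (distance : Int) (out : String) : Decidable (Spec_build_search_path_query entities distance out) := by unfold Spec_build_search_path_query; infer_instance

-- ===== CLAIM (what is proved, stated in full; the proofs are below) =====
def Claim_equal_build_search_path_query : Prop := ∀ (entities : List (String × String)) (distance : Int), Dom_build_search_path_query entities distance → Pre_build_search_path_query entities distance → Spec_build_search_path_query entities distance (build_search_path_query entities distance)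


-- ===== LEMMAS AND PROOFS =====

-- "".join(blocks) is just concatenation
theorem pv_join_nil_sep (xs : List (List Char)) : PySem.Chars.join [] xs = xs.flatten := by
  induction xs with
  | nil => simp [PySem.Chars.join_nil]
  | cons x xs ih =>
      cases xs with
      | nil => simp [PySem.Chars.join_singleton]
      | cons y ys =>
          rw [PySem.Chars.join_cons_cons]
          simp only [List.flatten_cons] at *
          simp [ih]

-- "\n".join(x :: xs) = x ++ concat of '\n'-prefixed lines
theorem pv_join_newline (x : List Char) (xs : List (List Char)) :
    PySem.Chars.join ['\n'] (x :: xs) = x ++ (xs.map (fun l => '\n' :: l)).flatten := by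
  induction xs generalizing x with
  | nil => simp [PySem.Chars.join_singleton]
  | cons y ys ih =>
      rw [PySem.Chars.join_cons_cons, ih y]
      simp

theorem pv_format_prefix (pre s a : List Char) (h : '{' ∉ pre) :
    pvFormat (pre ++ s) a = pre ++ pvFormat s a := by
  induction pre with
  | nil => rfl
  | cons c cs ih =>
      have hc : c ≠ '{' := fun hc => h (by simp [hc])
      have : '{' ∉ cs := fun hm => h (by simp [hm])
      simp [pvFormat, hc, ih this]

theorem pv_no_brace_tabs (n : Nat) : '{' ∉ pvTabs n := by
  simp [pvTabs]

-- A's recursive path = prefix with the "{}" hole, then B's later lines '\n'-prefixed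
theorem pv_mkPath_shape (d : Nat) (id : Int) (tabs : Nat) :
    pvMkPath d id tabs
      = (pvTabs tabs ++ "w:".toList) ++ '{' :: '}' ::
          (" ?p0 ?o_".toList ++ PySem.Int.toChars id ++ "_0 .".toList
            ++ (((PySem.List.pyRange 1 ((d : Int) + 1) 1).map (pvLineD id tabs)).map
                  (fun l => '\n' :: l)).flatten) := by
  induction d with
  | zero =>
      simp [pvMkPath, PySem.List.pyRange_one_eq_nil]
  | succ k ih =>
      rw [pvMkPath, ih]
      push_cast
      conv_rhs => rw [PySem.List.pyRange_one_succ_right (a := 1) (b := (k : Int) + 1) (by omega)]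
      simp [pvLineD, List.map_append, List.flatten_append, add_sub_cancel_right]

theorem pv_fmt_mkPath (d : Nat) (id : Int) (tabs : Nat) (a : List Char) :
    pvFormat (pvMkPath d id tabs) a
      = PySem.Chars.join ['\n']
          (pvLine0 a id tabs :: (PySem.List.pyRange 1 ((d : Int) + 1) 1).map (pvLineD id tabs)) := by
  rw [pv_mkPath_shape, pv_join_newline]
  rw [pv_format_prefix _ _ _ (by
    intro hm
    rcases List.mem_append.mp hm with h | h
    · exact pv_no_brace_tabs _ h
    · revert h; decide)]
  simp [pvFormat, pvLine0]

-- entities.pop() on a list written as ys ++ [x]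
theorem pv_pop_concat {A : Type} (ys : List A) (x : A) :
    PySem.List.pop? (ys ++ [x]) = some (x, ys) := by
  have h : (ys ++ [x]).eraseIdx ys.length = ys := by
    rw [List.eraseIdx_append_of_length_le (le_refl _)]
    simp
  simp [PySem.List.pop?, PySem.List.pyIdx?, h]

-- A's format-then-replace of the recursive path IS B's path_block
theorem pv_block_eq (a b : List Char) (id : Int) (tabs : Nat) (distance : Int)
    (hd : 0 ≤ distance) :
    PySem.Chars.replace (pvFormat (pvMkPath distance.toNat id tabs) a)
        ("?o_".toList ++ (PySem.Int.toChars id ++ ("_".toList ++ PySem.Int.toChars distance)))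
        ("w:".toList ++ b)
      = pvBlock a b id tabs distance := by
  unfold pvBlock
  rw [pv_fmt_mkPath, Int.toNat_of_nonneg hd]
  simp

-- ===== VERDICT (by name: the statement is the Claim_ definition above) =====
theorem build_search_path_query_spec : Claim_equal_build_search_path_query := by
  intro entities distance _ hpre
  obtain ⟨hne, hd⟩ := hpre
  simp only [Spec_build_search_path_query, build_search_path_query, build_search_path_query_alt]
  rcases List.eq_nil_or_concat (entities.map (fun p => (pvFmtEl p.1.toList, pvFmtEl p.2.toList)))
    with h | ⟨ys, x, h⟩
  · exact absurd (List.map_eq_nil_iff.mp h) hne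
  · rw [List.concat_eq_append] at h
    rw [h, pv_pop_concat, PySem.List.pyGet?_neg_one, List.getLast?_concat,
        PySem.List.slice_to_neg_one, List.dropLast_concat]
    rw [show ("?o_0_".toList : List Char) = "?o_".toList ++ PySem.Int.toChars 0 ++ "_".toList
          from by decide]
    simp only [List.append_assoc, PySem.List.foldl_append_eq_flatMap, pv_join_nil_sep,
      List.flatMap_def, List.nil_append, pv_block_eq _ _ _ _ _ hd]
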